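-- pv_equiv track=rewrite | github.com/olegfour3/2d-irregular-packing | input_utls.py | find_flags_and_break_shapes
-- ===== SOURCE A (Python) =====
-- def find_flags_and_break_shapes(shapes):
--     new_shapes = []
--
--     for i, shape_points in enumerate(shapes):
--         shape_points_length = len(shape_points)
--         new_shape_points = []
--         skip = 0
--         for j, shape_point in enumerate(shape_points):
--             if skip > 0:
--                 skip -= 1
--                 continue
--             x, y = shape_point
--             if j < shape_points_length - 5 and \
--                     shape_points[j + 1][0] == x and \
--                     shape_points[j + 1][1] == y and \
--                     shape_points[j + 2][0] == x and \
--                     shape_points[j + 2][1] == y and \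
--                     shape_points[j + 3][0] == x and \
--                     shape_points[j + 3][1] == y:
--                 new_shapes.append(new_shape_points)
--                 new_shape_points = []
--                 skip = 3
--                 continue
--             new_shape_points.append((x, y))
--         new_shapes.append(new_shape_points)
--
--     return new_shapes
-- ===== SOURCE B (Python) =====
-- def find_flags_and_break_shapes(shapes):
--     new_shapes = []
--     for pts in shapes:
--         n = len(pts)
--         # pass 1: index scan collecting flag start positions
--         flags = []
--         j = 0
--         while j < n - 5:
--             if pts[j + 1] == pts[j] and pts[j + 2] == pts[j] and pts[j + 3] == pts[j]:
--                 flags.append(j)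
--                 j += 4
--             else:
--                 j += 1
--         # pass 2: slice the points into segments at the flags
--         prev = 0
--         for f in flags:
--             new_shapes.append([(x, y) for (x, y) in pts[prev:f]])
--             prev = f + 4
--         new_shapes.append([(x, y) for (x, y) in pts[prev:]])
--     return new_shapes
-- ===== Notes on version B (the rewrite author's own statement) =====
-- stated objective: alternative
-- what changed: A's single pass with a skip counter interleaving detection and output is replaced by two passes per shape: an index scan that collects flag start positions, then a slicing pass that cuts the point list into segments at those positions.
import Mathlib
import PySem

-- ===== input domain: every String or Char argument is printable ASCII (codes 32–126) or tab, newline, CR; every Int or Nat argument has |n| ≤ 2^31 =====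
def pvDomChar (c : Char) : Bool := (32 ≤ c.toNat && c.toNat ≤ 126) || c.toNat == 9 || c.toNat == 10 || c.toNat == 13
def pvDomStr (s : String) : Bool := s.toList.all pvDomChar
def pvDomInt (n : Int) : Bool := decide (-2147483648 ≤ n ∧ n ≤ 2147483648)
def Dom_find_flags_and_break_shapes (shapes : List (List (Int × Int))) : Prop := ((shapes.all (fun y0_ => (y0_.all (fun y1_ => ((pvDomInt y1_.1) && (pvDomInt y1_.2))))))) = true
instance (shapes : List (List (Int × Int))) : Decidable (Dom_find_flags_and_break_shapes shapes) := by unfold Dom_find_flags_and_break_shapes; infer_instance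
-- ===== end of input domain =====

-- B replaces A's single skip-counter loop by two passes per shape (collect flag start
-- indices, then slice the shape into segments); objective: alternative decomposition.


-- ===== PORT A =====
-- inner 'for j, shape_point in enumerate(shape_points)' loop of A, carrying (j, skip, cur);
-- the trailing 'new_shapes.append(new_shape_points)' is the [] case; indices j+1..j+3 are
-- nonnegative, ported with PySem.List.pyGet? (none never occurs when the guard holds)
def goA (pts : List (Int × Int)) : List (Int × Int) → Nat → Nat → List (Int × Int) → List (List (Int × Int))
  | [], _, _, cur => [cur]
  | p :: rest, j, skip, cur =>
    if skip > 0 then goA pts rest (j + 1) (skip - 1) cur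
    else if (j : Int) < (pts.length : Int) - 5 ∧
            PySem.List.pyGet? pts ((j + 1 : Nat) : Int) = some p ∧
            PySem.List.pyGet? pts ((j + 2 : Nat) : Int) = some p ∧
            PySem.List.pyGet? pts ((j + 3 : Nat) : Int) = some p then
      cur :: goA pts rest (j + 1) 3 []
    else goA pts rest (j + 1) 0 (cur ++ [p])

def find_flags_and_break_shapes (shapes : List (List (Int × Int))) : List (List (Int × Int)) :=
  shapes.foldl (fun new_shapes pts => new_shapes ++ goA pts pts 0 0 []) []

-- ===== PORT B =====
-- pass 1 of B: the 'while j < n - 5' scan collecting flag start indices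
def flagsB (pts : List (Int × Int)) (j : Nat) : List Nat :=
  if h : (j : Int) < (pts.length : Int) - 5 then
    if PySem.List.pyGet? pts ((j + 1 : Nat) : Int) = PySem.List.pyGet? pts ((j : Nat) : Int) ∧
       PySem.List.pyGet? pts ((j + 2 : Nat) : Int) = PySem.List.pyGet? pts ((j : Nat) : Int) ∧
       PySem.List.pyGet? pts ((j + 3 : Nat) : Int) = PySem.List.pyGet? pts ((j : Nat) : Int) then
      j :: flagsB pts (j + 4)
    else flagsB pts (j + 1)
  else []
termination_by pts.length - j
decreasing_by all_goals omega

-- pass 2 of B: cut pts at the flags; pts[prev:f] / pts[prev:] are PySem slices,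
-- '[(x, y) for (x, y) in …]' is the map
def segsB (pts : List (Int × Int)) : List Nat → Nat → List (List (Int × Int))
  | [], prev => [(PySem.List.slice pts (some (prev : Int)) none).map (fun q => (q.1, q.2))]
  | f :: fs, prev =>
      ((PySem.List.slice pts (some (prev : Int)) (some (f : Int))).map (fun q => (q.1, q.2)))
        :: segsB pts fs (f + 4)

def find_flags_and_break_shapes_alt (shapes : List (List (Int × Int))) : List (List (Int × Int)) :=
  shapes.foldl (fun new_shapes pts => new_shapes ++ segsB pts (flagsB pts 0) 0) []

-- ===== PRECONDITION & SPEC =====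
def Spec_find_flags_and_break_shapes (shapes : List (List (Int × Int))) (out : List (List (Int × Int))) : Prop := out = find_flags_and_break_shapes_alt shapes
instance (shapes : List (List (Int × Int))) (out : List (List (Int × Int))) : Decidable (Spec_find_flags_and_break_shapes shapes out) := by unfold Spec_find_flags_and_break_shapes; infer_instance

-- ===== CLAIM (what is proved, stated in full; the proofs are below) =====
def Claim_equal_find_flags_and_break_shapes : Prop := ∀ (shapes : List (List (Int × Int))), Dom_find_flags_and_break_shapes shapes → Spec_find_flags_and_break_shapes shapes (find_flags_and_break_shapes shapes)

-- ===== LEMMAS AND PROOFS =====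

-- attach the pending first segment 'cur' of A's loop in front of B's segment list
def prependSeg (cur : List (Int × Int)) : List (List (Int × Int)) → List (List (Int × Int))
  | [] => [cur]
  | s :: ss => (cur ++ s) :: ss

theorem prependSeg_nil_segsB (pts : List (Int × Int)) (fs : List Nat) (prev : Nat) :
    prependSeg [] (segsB pts fs prev) = segsB pts fs prev := by
  cases fs <;> simp [segsB, prependSeg]

theorem flagsB_ge (pts : List (Int × Int)) :
    ∀ n j, pts.length - j ≤ n → ∀ f ∈ flagsB pts j, j ≤ f := by
  intro n
  induction n with
  | zero =>
    intro j h f hf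
    rw [flagsB] at hf
    have : ¬ ((j : Int) < (pts.length : Int) - 5) := by omega
    simp [this] at hf
  | succ n ih =>
    intro j h f hf
    rw [flagsB] at hf
    by_cases hg : (j : Int) < (pts.length : Int) - 5
    · simp only [hg, dif_pos] at hf
      split_ifs at hf with hc
      · rcases List.mem_cons.mp hf with rfl | hf
        · exact le_refl _
        · have := ih (j + 4) (by omega) f hf; omega
      · have := ih (j + 1) (by omega) f hf; omega
    · simp [hg] at hf

theorem goA_skip3 (pts : List (Int × Int)) (j : Nat) (cur : List (Int × Int))
    (h : j + 4 < pts.length) :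
    goA pts (pts.drop (j + 1)) (j + 1) 3 cur = goA pts (pts.drop (j + 4)) (j + 4) 0 cur := by
  rw [List.drop_eq_getElem_cons (by omega : j + 1 < pts.length),
      List.drop_eq_getElem_cons (by omega : j + 2 < pts.length),
      List.drop_eq_getElem_cons (by omega : j + 3 < pts.length)]
  show goA pts (_ :: _ :: _ :: pts.drop (j + 4)) (j + 1) 3 cur = _
  simp only [goA, if_pos (by omega : (3:Nat) > 0), if_pos (by omega : (2:Nat) > 0),
    if_pos (by omega : (1:Nat) > 0)]

theorem main_base (pts : List (Int × Int)) (j : Nat) (cur : List (Int × Int))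
    (h : pts.length ≤ j) :
    goA pts (pts.drop j) j 0 cur = prependSeg cur (segsB pts (flagsB pts j) j) := by
  have hd : pts.drop j = [] := List.drop_eq_nil_of_le h
  rw [hd, flagsB]
  have hg : ¬ ((j : Int) < (pts.length : Int) - 5) := by omega
  simp [hg, goA, segsB, prependSeg, PySem.List.slice_from_natCast, hd]

theorem main (pts : List (Int × Int)) :
    ∀ n j cur, pts.length - j ≤ n →
      goA pts (pts.drop j) j 0 cur = prependSeg cur (segsB pts (flagsB pts j) j) := by
  intro n
  induction n with
  | zero => intro j cur h; exact main_base pts j cur (by omega)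
  | succ n ih =>
    intro j cur h
    by_cases hj : j < pts.length
    · have hd : pts.drop j = pts[j] :: pts.drop (j + 1) := List.drop_eq_getElem_cons hj
      have hget : pts[j]? = some pts[j] := List.getElem?_eq_getElem hj
      rw [hd]
      show (if (0:Nat) > 0 then _ else _) = _
      rw [if_neg (by omega)]
      by_cases hg : (j : Int) < (pts.length : Int) - 5
      · have hlen : j + 5 < pts.length := by omega
        have hgetj : PySem.List.pyGet? pts ((j : Nat) : Int) = some pts[j] := by
          rw [PySem.List.pyGet?_natCast, hget]
        by_cases hc : pts[j+1]? = some pts[j] ∧ pts[j+2]? = some pts[j] ∧ pts[j+3]? = some pts[j]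
        · -- flag found at j
          rw [if_pos (⟨hg, by rw [PySem.List.pyGet?_natCast]; exact hc.1,
              by rw [PySem.List.pyGet?_natCast]; exact hc.2.1,
              by rw [PySem.List.pyGet?_natCast]; exact hc.2.2⟩ :
              (j : Int) < (pts.length : Int) - 5 ∧ _ ∧ _ ∧ _)]
          rw [goA_skip3 pts j [] (by omega)]
          rw [ih (j + 4) [] (by omega)]
          rw [prependSeg_nil_segsB]
          have hfj : flagsB pts j = j :: flagsB pts (j + 4) := by
            conv_lhs => rw [flagsB]
            rw [dif_pos hg, if_pos ⟨by rw [PySem.List.pyGet?_natCast, hgetj]; exact hc.1,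
              by rw [PySem.List.pyGet?_natCast, hgetj]; exact hc.2.1,
              by rw [PySem.List.pyGet?_natCast, hgetj]; exact hc.2.2⟩]
          rw [hfj]
          simp [segsB, prependSeg, PySem.List.slice_natCast]
        · -- no flag at j
          rw [if_neg (by
            rintro ⟨-, h2, h3, h4⟩
            rw [PySem.List.pyGet?_natCast] at h2 h3 h4
            exact hc ⟨h2, h3, h4⟩)]
          rw [ih (j + 1) (cur ++ [pts[j]]) (by omega)]
          have hfl : flagsB pts j = flagsB pts (j + 1) := by
            conv_lhs => rw [flagsB]
            rw [dif_pos hg, if_neg (by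
              rintro ⟨h2, h3, h4⟩
              rw [PySem.List.pyGet?_natCast, hgetj] at h2 h3 h4
              exact hc ⟨h2, h3, h4⟩)]
          rw [hfl]
          cases hfs : flagsB pts (j + 1) with
          | nil =>
            simp only [segsB, prependSeg, PySem.List.slice_from_natCast, hd]
            simp
          | cons f fs =>
            have hf : j + 1 ≤ f := flagsB_ge pts (pts.length) (j + 1) (by omega) f
              (by rw [hfs]; exact List.mem_cons_self)
            simp only [segsB, prependSeg, PySem.List.slice_natCast, hd]
            have : (f - j) = (f - (j + 1)) + 1 := by omega
            rw [this, List.take_succ_cons]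
            simp
      · -- tail of the shape: no further flags possible
        rw [if_neg (by simp [hg])]
        rw [ih (j + 1) (cur ++ [pts[j]]) (by omega)]
        have hfl : flagsB pts j = [] := by rw [flagsB]; simp [hg]
        have hfl1 : flagsB pts (j + 1) = [] := by
          rw [flagsB, dif_neg (by push_cast; omega)]
        rw [hfl, hfl1]
        simp only [segsB, prependSeg, PySem.List.slice_from_natCast, hd]
        simp
    · exact main_base pts j cur (by omega)

theorem shape_eq (pts : List (Int × Int)) :
    goA pts pts 0 0 [] = segsB pts (flagsB pts 0) 0 := by
  have := main pts pts.length 0 [] (by omega)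
  simpa [prependSeg_nil_segsB] using this

theorem foldl_eq (shapes : List (List (Int × Int))) :
    ∀ acc, shapes.foldl (fun ns pts => ns ++ goA pts pts 0 0 []) acc
      = shapes.foldl (fun ns pts => ns ++ segsB pts (flagsB pts 0) 0) acc := by
  induction shapes with
  | nil => intro acc; rfl
  | cons p ps _ => intro acc; simp only [List.foldl_cons, shape_eq]

-- ===== VERDICT (by name: the statement is the Claim_ definition above) =====
theorem find_flags_and_break_shapes_spec : Claim_equal_find_flags_and_break_shapes := by
  intro shapes _
  unfold Spec_find_flags_and_break_shapes find_flags_and_break_shapes find_flags_and_break_shapes_alt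
  exact foldl_eq shapes []
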